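-- pv_equiv track=rewrite | github.com/Bourn3z/mindocr | mindocr/data/rec_lmdb_dataset.py | count_extra_len_if_repeated
-- ===== SOURCE A (Python) =====
-- def count_extra_len_if_repeated(label: str) -> int:
--     if len(label) < 2:
--         return len(label)
--     num = 1
--     for i in range(1, len(label)):
--         if label[i] == label[i - 1]:
--             num += 2
--         else:
--             num += 1
--     return num
-- ===== SOURCE B (Python) =====
-- def count_extra_len_if_repeated(label: str) -> int:
--     # Scan maximal runs of equal characters: a run of length L contributes
--     # L characters plus L-1 "extra" repeats, i.e. 2*L - 1 in total.
--     total = 0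
--     i = 0
--     n = len(label)
--     while i < n:
--         j = i + 1
--         while j < n and label[j] == label[i]:
--             j += 1
--         total += 2 * (j - i) - 1
--         i = j
--     return total
-- ===== Notes on version B (the rewrite author's own statement) =====
-- stated objective: alternative
-- what changed: Replaces A's per-index +2/+1 branch over range(1,len) (with a len<2 special case) by a run-scanning algorithm: an outer loop walks maximal runs of equal characters with an inner while advancing past the run, adding 2*runlen-1 per run; no special case needed.
import Mathlib
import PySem

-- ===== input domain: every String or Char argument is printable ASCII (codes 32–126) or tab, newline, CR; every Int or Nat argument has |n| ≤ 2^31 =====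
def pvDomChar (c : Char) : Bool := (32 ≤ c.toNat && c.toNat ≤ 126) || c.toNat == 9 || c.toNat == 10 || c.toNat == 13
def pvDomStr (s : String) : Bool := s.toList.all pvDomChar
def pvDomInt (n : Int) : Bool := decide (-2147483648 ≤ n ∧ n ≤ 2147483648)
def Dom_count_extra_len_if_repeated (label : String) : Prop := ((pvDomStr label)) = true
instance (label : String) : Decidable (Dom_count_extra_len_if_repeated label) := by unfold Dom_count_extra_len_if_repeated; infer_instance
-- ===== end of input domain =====

-- B scans maximal runs of equal characters (outer loop per run, inner loop past the run)
-- and adds 2*runlen-1 per run, instead of A's per-index +2/+1 branch; same O(n) cost.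


-- ===== PORT A =====
-- faithful port of A: early return for len < 2, then a loop over range(1, len)
-- comparing label[i] with label[i-1]; indices are always in range, so pyGetD's
-- default 'A' is never read.
def count_extra_len_if_repeated (label : String) : Int :=
  let l := label.toList
  if l.length < 2 then (l.length : Int)
  else
    (PySem.List.pyRange 1 (l.length : Int) 1).foldl
      (fun num i =>
        if PySem.List.pyGetD l i 'A' == PySem.List.pyGetD l (i - 1) 'A' then num + 2
        else num + 1)
      1

-- ===== PORT B =====
-- inner while of B: consume the characters equal to c at the front of the list,
-- returning (run length consumed, rest of the list)
def runStep (c : Char) : List Char → Nat × List Char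
  | [] => (0, [])
  | x :: t => if x = c then let p := runStep c t; (p.1 + 1, p.2) else (0, x :: t)

lemma runStep_len (c : Char) (t : List Char) : (runStep c t).2.length ≤ t.length := by
  induction t with
  | nil => simp [runStep]
  | cons x t ih =>
    simp only [runStep]
    split
    · simpa using Nat.le_succ_of_le ih
    · simp

-- outer while of B: each iteration handles one maximal run, adding 2*runlen - 1
def runLoop : List Char → Int
  | [] => 0
  | c :: t => (2 * (((runStep c t).1 : Int) + 1) - 1) + runLoop (runStep c t).2
termination_by l => l.length
decreasing_by
  have := runStep_len c t
  simp only [List.length_cons]; omega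

-- faithful port of B: run-scanning loop over the characters
def count_extra_len_if_repeated_alt (label : String) : Int :=
  runLoop label.toList

-- ===== PRECONDITION & SPEC =====
def Spec_count_extra_len_if_repeated (label : String) (out : Int) : Prop := out = count_extra_len_if_repeated_alt label
instance (label : String) (out : Int) : Decidable (Spec_count_extra_len_if_repeated label out) := by unfold Spec_count_extra_len_if_repeated; infer_instance

-- ===== CLAIM (what is proved, stated in full; the proofs are below) =====
def Claim_equal_count_extra_len_if_repeated : Prop := ∀ (label : String), Dom_count_extra_len_if_repeated label → Spec_count_extra_len_if_repeated label (count_extra_len_if_repeated label)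

-- ===== LEMMAS AND PROOFS =====

/-- number of adjacent equal pairs -/
def eqPairs : List Char → Nat
  | [] => 0
  | [_] => 0
  | a :: b :: t => (if a = b then 1 else 0) + eqPairs (b :: t)

/-- the inner while consumes exactly the leading run: it splits length and eqPairs. -/
lemma runStep_spec (c : Char) (t : List Char) :
    eqPairs (c :: t) = (runStep c t).1 + eqPairs (runStep c t).2
    ∧ t.length = (runStep c t).1 + (runStep c t).2.length := by
  induction t generalizing c with
  | nil => simp [runStep, eqPairs]
  | cons x t ih =>
    by_cases hx : x = c
    · subst hx
      have := ih x
      simp only [runStep, eq_self_iff_true, if_true, eqPairs, List.length_cons] at *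
      omega
    · have hcx : c ≠ x := Ne.symm hx
      simp only [runStep, if_neg hx, eqPairs, if_neg hcx]
      cases t <;> simp [eqPairs, hcx]

/-- B's run loop computes length + eqPairs. -/
lemma runLoop_val : ∀ l : List Char, runLoop l = (l.length : Int) + eqPairs l
  | [] => by rw [runLoop]; simp [eqPairs]

  | c :: t => by
    have h1 := (runStep_spec c t).1
    have h2 := (runStep_spec c t).2
    have ih := runLoop_val (runStep c t).2
    rw [runLoop]
    simp only [List.length_cons]
    rw [ih]
    omega
termination_by l => l.length
decreasing_by
  have := runStep_len c t
  simp only [List.length_cons]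
  omega

lemma eqPairs_concat (t : List Char) (ht : t ≠ []) (x : Char) :
    eqPairs (t ++ [x]) = eqPairs t + (if t.getLast ht = x then 1 else 0) := by
  induction t with
  | nil => exact absurd rfl ht
  | cons a t ih =>
    cases t with
    | nil => simp [eqPairs]
    | cons b t' =>
      simp only [List.cons_append, eqPairs]
      simp only [List.cons_append] at ih
      rw [ih (by simp), List.getLast_cons_cons]
      omega

/-- A's loop computes length + eqPairs for nonempty lists. -/
lemma a_fold (l : List Char) (hl : l ≠ []) :
    (PySem.List.pyRange 1 (l.length : Int) 1).foldl
      (fun num i =>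
        if PySem.List.pyGetD l i 'A' == PySem.List.pyGetD l (i - 1) 'A' then num + 2
        else num + 1)
      1 = (l.length : Int) + eqPairs l := by
  induction l using List.reverseRecOn with
  | nil => exact absurd rfl hl
  | append_singleton xs x ih =>
    by_cases hxsne : xs = []
    · subst hxsne
      simp [PySem.List.pyRange, eqPairs]
    · have hn : 1 ≤ xs.length := List.length_pos_iff.mpr hxsne
      have hlen : ((xs ++ [x]).length : Int) = (xs.length : Int) + 1 := by
        simp
      rw [hlen, PySem.List.pyRange_one_succ_right (by exact_mod_cast hn),
          List.foldl_append]
      have hcong :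
          (PySem.List.pyRange 1 (xs.length : Int) 1).foldl
            (fun (num : Int) i =>
              if PySem.List.pyGetD (xs ++ [x]) i 'A'
                  == PySem.List.pyGetD (xs ++ [x]) (i - 1) 'A' then num + 2
              else num + 1) (1 : Int)
          = (PySem.List.pyRange 1 (xs.length : Int) 1).foldl
            (fun (num : Int) i =>
              if PySem.List.pyGetD xs i 'A'
                  == PySem.List.pyGetD xs (i - 1) 'A' then num + 2
              else num + 1) (1 : Int) := by
        apply PySem.List.foldl_congr_mem
        intro acc i hi
        rw [PySem.List.mem_pyRange_one] at hi
        have h1 : PySem.List.pyGetD (xs ++ [x]) i 'A' = PySem.List.pyGetD xs i 'A' := by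
          rw [PySem.List.pyGetD_eq_getElem _ 'A' (by omega) (by simp; omega),
              PySem.List.pyGetD_eq_getElem _ 'A' (by omega) (by omega),
              List.getElem_append_left]
        have h2 : PySem.List.pyGetD (xs ++ [x]) (i - 1) 'A'
            = PySem.List.pyGetD xs (i - 1) 'A' := by
          rw [PySem.List.pyGetD_eq_getElem _ 'A' (by omega) (by simp; omega),
              PySem.List.pyGetD_eq_getElem _ 'A' (by omega) (by omega),
              List.getElem_append_left]
        rw [h1, h2]
      simp only [hcong, ih hxsne]
      have hx1 : PySem.List.pyGetD (xs ++ [x]) (xs.length : Int) 'A' = x := by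
        rw [PySem.List.pyGetD_eq_getElem _ 'A' (by omega) (by simp)]
        simp
      have hx2 : PySem.List.pyGetD (xs ++ [x]) ((xs.length : Int) - 1) 'A'
          = xs.getLast hxsne := by
        rw [PySem.List.pyGetD_eq_getElem _ 'A' (by omega) (by simp)]
        have ht : ((xs.length : Int) - 1).toNat = xs.length - 1 := by omega
        rw [List.getLast_eq_getElem]
        simp only [ht]
        rw [List.getElem_append_left]
      rw [List.foldl_cons, List.foldl_nil, hx1, hx2, eqPairs_concat xs hxsne x]
      simp only [beq_iff_eq]
      by_cases hlast : xs.getLast hxsne = x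
      · simp only [hlast]
        push_cast
        omega
      · rw [if_neg (fun h => hlast h.symm), if_neg hlast]
        push_cast
        omega

-- ===== VERDICT (by name: the statement is the Claim_ definition above) =====
theorem count_extra_len_if_repeated_spec : Claim_equal_count_extra_len_if_repeated := by
  intro label _
  unfold Spec_count_extra_len_if_repeated count_extra_len_if_repeated_alt
  rw [runLoop_val]
  unfold count_extra_len_if_repeated
  by_cases h : label.toList.length < 2
  · rw [if_pos h]
    cases hl : label.toList with
    | nil => simp [eqPairs]
    | cons c t =>
      cases t with
      | nil => simp [eqPairs]
      | cons d t' => rw [hl] at h; simp at h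
  · rw [if_neg h]
    exact a_fold _ (by intro hnil; rw [hnil] at h; simp at h)
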